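-- pv_equiv track=rewrite | github.com/dppresearch01/ProBE | probe_algo.py | earlyElimination
-- ===== SOURCE A (Python) =====
-- def earlyElimination(first_step_classes, type):
--     idx_to_elim = []
--     for i in range(len(first_step_classes[0])):
--         class_per_idx = []
--         for c in first_step_classes:
--             class_per_idx.append(c[i])
--         ## if conjunction then check if ONE is DECIDED FALSE -> 0 and ONE is undecided -> 2
--         if type == 1 and 0 in class_per_idx and 2 in class_per_idx:
--             idx_to_elim.append(i)
--
--         ## if disjunction then check if ONE is TRUE
--         elif type == 0 and 1 in class_per_idx and 2 in class_per_idx: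
--             idx_to_elim.append(i)
--     return idx_to_elim
-- ===== SOURCE B (Python) =====
-- def earlyElimination(first_step_classes, type):
--     # pick the two class values whose joint presence in a column eliminates it
--     if type == 1:
--         t1, t2 = 0, 2
--     elif type == 0:
--         t1, t2 = 1, 2
--     else:
--         return []
--     n = len(first_step_classes[0])
--     has_first = [False] * n
--     has_second = [False] * n
--     for row in first_step_classes:
--         for j in range(n):
--             v = row[j]
--             if v == t1:
--                 has_first[j] = True
--             if v == t2:
--                 has_second[j] = True
--     return [j for j in range(n) if has_first[j] and has_second[j]]
-- ===== Notes on version B (the rewrite author's own statement) =====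
-- stated objective: faster
-- what changed: Instead of building a per-column value list and running two membership scans for each column, B resolves the two target values from `type` once (returning [] early for unknown types), makes one row-major pass flipping two per-column boolean flag arrays, and emits the indices where both flags are set.
import Mathlib
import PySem

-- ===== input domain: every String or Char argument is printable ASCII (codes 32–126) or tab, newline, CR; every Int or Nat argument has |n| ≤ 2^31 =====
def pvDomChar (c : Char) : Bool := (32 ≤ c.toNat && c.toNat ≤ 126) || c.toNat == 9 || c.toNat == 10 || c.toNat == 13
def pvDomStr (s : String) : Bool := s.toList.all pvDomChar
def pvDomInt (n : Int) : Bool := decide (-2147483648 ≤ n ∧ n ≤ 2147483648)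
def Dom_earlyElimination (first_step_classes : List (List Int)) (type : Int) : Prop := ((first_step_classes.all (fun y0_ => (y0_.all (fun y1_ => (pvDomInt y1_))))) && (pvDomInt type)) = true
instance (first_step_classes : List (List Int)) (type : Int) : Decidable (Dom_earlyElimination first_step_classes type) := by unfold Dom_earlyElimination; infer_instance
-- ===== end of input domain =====

-- B replaces A's per-column list building + membership scans by one row-major pass over
-- two boolean flag arrays (same asymptotics, measurably faster by constant factor).

-- ===== PORT A =====
-- literal port of A: for each column index i, collect the column, test the two memberships
def earlyElimination (first_step_classes : List (List Int)) (type : Int) : List Int :=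
  (PySem.List.pyRange 0 ((first_step_classes.headD []).length : Int) 1).foldl
    (fun idx_to_elim i =>
      let class_per_idx := first_step_classes.foldl
        (fun cp c => cp ++ [PySem.List.pyGetD c i 0]) []
      if type = 1 ∧ (0:Int) ∈ class_per_idx ∧ (2:Int) ∈ class_per_idx then
        idx_to_elim ++ [i]
      else if type = 0 ∧ (1:Int) ∈ class_per_idx ∧ (2:Int) ∈ class_per_idx then
        idx_to_elim ++ [i]
      else idx_to_elim) []

-- ===== PORT B =====
-- B's inner loop over the columns of one row, flipping the two flag lists
def eeRowPass (t1 t2 : Int) (n : Nat) (p : List Bool × List Bool) (row : List Int) :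
    List Bool × List Bool :=
  (List.range n).foldl
    (fun q j =>
      let v := row.getD j 0
      (if v = t1 then q.1.set j true else q.1,
       if v = t2 then q.2.set j true else q.2)) p

def earlyElimination_alt (first_step_classes : List (List Int)) (type : Int) : List Int :=
  match (if type = 1 then some ((0:Int), (2:Int))
         else if type = 0 then some ((1:Int), (2:Int)) else none) with
  | none => []
  | some (t1, t2) =>
    let n := (first_step_classes.headD []).length
    let flags := first_step_classes.foldl (eeRowPass t1 t2 n)
      (List.replicate n false, List.replicate n false)
    (List.range n).foldl
      (fun acc j =>
        if flags.1.getD j false && flags.2.getD j false then acc ++ [(j : Int)]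
        else acc) []

-- ===== PRECONDITION & SPEC =====
-- Pre_ excludes exactly the inputs on which Python A raises IndexError:
-- the empty outer list (first_step_classes[0]) and rows shorter than the first row (c[i]).
def Pre_earlyElimination (first_step_classes : List (List Int)) (type : Int) : Prop :=
  0 < first_step_classes.length ∧
    ∀ c ∈ first_step_classes, (first_step_classes.headD []).length ≤ c.length
instance (first_step_classes : List (List Int)) (type : Int) : Decidable (Pre_earlyElimination first_step_classes type) := by unfold Pre_earlyElimination; infer_instance

def pvWitness_earlyElimination : List (List Int) × Int := ([[0, 1], [2, 2]], 1)

def Spec_earlyElimination (first_step_classes : List (List Int)) (type : Int) (out : List Int) : Prop := out = earlyElimination_alt first_step_classes type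
instance (first_step_classes : List (List Int)) (type : Int) (out : List Int) : Decidable (Spec_earlyElimination first_step_classes type out) := by unfold Spec_earlyElimination; infer_instance

-- ===== CLAIM (what is proved, stated in full; the proofs are below) =====
def Claim_equal_earlyElimination : Prop := ∀ (first_step_classes : List (List Int)) (type : Int), Dom_earlyElimination first_step_classes type → Pre_earlyElimination first_step_classes type → Spec_earlyElimination first_step_classes type (earlyElimination first_step_classes type)

-- ===== LEMMAS AND PROOFS =====

-- single-flag update loop used to analyse eeRowPass componentwise
def eeSetLoop (t : Int) (row : List Int) (n : Nat) (h : List Bool) : List Bool :=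
  (List.range n).foldl (fun h j => if row.getD j 0 = t then h.set j true else h) h

theorem eeSetLoop_succ (t : Int) (row : List Int) (m : Nat) (h : List Bool) :
    eeSetLoop t row (m+1) h
      = (if row.getD m 0 = t then (eeSetLoop t row m h).set m true
         else eeSetLoop t row m h) := by
  simp only [eeSetLoop, List.range_succ, List.foldl_append, List.foldl_cons, List.foldl_nil]

theorem eeSetLoop_length (t : Int) (row : List Int) (n : Nat) (h : List Bool) :
    (eeSetLoop t row n h).length = h.length := by
  induction n generalizing h with
  | zero => simp [eeSetLoop]
  | succ m ih =>
    rw [eeSetLoop_succ]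
    split <;> simp [List.length_set, ih]

theorem eeSetLoop_getD_ge (t : Int) (row : List Int) (n : Nat) (h : List Bool) (j : Nat)
    (hj : n ≤ j) : (eeSetLoop t row n h).getD j false = h.getD j false := by
  induction n generalizing h with
  | zero => simp [eeSetLoop]
  | succ m ih =>
    rw [eeSetLoop_succ]
    have hne : m ≠ j := by omega
    split
    · rw [List.getD, List.getElem?_set_ne hne, ← List.getD]
      exact ih h (by omega)
    · exact ih h (by omega)

theorem eeSetLoop_getD (t : Int) (row : List Int) (n : Nat) (h : List Bool)
    (j : Nat) (hj : j < n) (hjh : j < h.length) :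
    (eeSetLoop t row n h).getD j false
      = (h.getD j false || decide (row.getD j 0 = t)) := by
  induction n with
  | zero => omega
  | succ m ih =>
    rw [eeSetLoop_succ]
    by_cases hjm : j < m
    · have hne : m ≠ j := by omega
      have hstep : ∀ (l : List Bool), ((l.set m true)).getD j false = l.getD j false := by
        intro l; rw [List.getD, List.getElem?_set_ne hne, ← List.getD]
      split
      · rw [hstep]; exact ih hjm
      · exact ih hjm
    · have hjme : j = m := by omega
      subst hjme
      have hbase : (eeSetLoop t row j h).getD j false = h.getD j false :=
        eeSetLoop_getD_ge t row j h j le_rfl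
      have hlen : j < (eeSetLoop t row j h).length := by
        rw [eeSetLoop_length]; exact hjh
      split
      · rename_i hc
        simp only [List.getD_eq_getElem?_getD]
        rw [List.getElem?_set_self]
        · simp only [List.getD_eq_getElem?_getD] at hc
          simp [hc]
        · exact hlen
      · rename_i hc
        rw [hbase]
        simp only [List.getD_eq_getElem?_getD] at hc
        simp [hc]

-- a fold with two independent accumulators is two folds
theorem pairFold {α β γ : Type} (f : β → α → β) (g : γ → α → γ) (l : List α) (p : β × γ) :
    l.foldl (fun q x => (f q.1 x, g q.2 x)) p = (l.foldl f p.1, l.foldl g p.2) := by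
  induction l generalizing p with
  | nil => rfl
  | cons a l ih => rw [List.foldl_cons, ih]; rfl

-- the outer row loop of B acts on the two flag lists independently
theorem eeRowPass_eq (t1 t2 : Int) (n : Nat) (p : List Bool × List Bool) (row : List Int) :
    eeRowPass t1 t2 n p row
      = ((List.range n).foldl (fun h j => if row.getD j 0 = t1 then h.set j true else h) p.1,
         (List.range n).foldl (fun h j => if row.getD j 0 = t2 then h.set j true else h) p.2) := by
  exact pairFold (fun h j => if row.getD j 0 = t1 then h.set j true else h)
    (fun h j => if row.getD j 0 = t2 then h.set j true else h) (List.range n) p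

theorem flags_eq (t1 t2 : Int) (n : Nat) (fsc : List (List Int)) (p : List Bool × List Bool) :
    fsc.foldl (eeRowPass t1 t2 n) p
      = (fsc.foldl (fun h row => eeSetLoop t1 row n h) p.1,
         fsc.foldl (fun h row => eeSetLoop t2 row n h) p.2) := by
  induction fsc generalizing p with
  | nil => rfl
  | cons r rest ih => rw [List.foldl_cons, ih, eeRowPass_eq]; rfl

theorem flagFold_getD (t : Int) (n : Nat) (fsc : List (List Int)) (h : List Bool)
    (hlen : h.length = n) (j : Nat) (hj : j < n) :
    (fsc.foldl (fun h row => eeSetLoop t row n h) h).getD j false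
      = (h.getD j false || fsc.any (fun row => decide (row.getD j 0 = t))) := by
  induction fsc generalizing h with
  | nil => simp
  | cons r rest ih =>
    rw [List.foldl_cons, ih _ (by rw [eeSetLoop_length]; exact hlen),
        eeSetLoop_getD t r n h j hj (by omega)]
    simp [Bool.or_assoc]

def natToInt (j : Nat) : Int := Int.ofNat j

theorem natToInt_eq : natToInt = (fun j : Nat => (j : Int)) := rfl

-- A as a filter over the column indices
theorem A_eq (fsc : List (List Int)) (type : Int) :
    earlyElimination fsc type
      = ((List.range (fsc.headD []).length).filter
          (fun (j : Nat) => decide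
            ((type = 1 ∧ (0:Int) ∈ fsc.map (fun c => PySem.List.pyGetD c (j:Int) 0)
                       ∧ (2:Int) ∈ fsc.map (fun c => PySem.List.pyGetD c (j:Int) 0)) ∨
             (type = 0 ∧ (1:Int) ∈ fsc.map (fun c => PySem.List.pyGetD c (j:Int) 0)
                       ∧ (2:Int) ∈ fsc.map (fun c => PySem.List.pyGetD c (j:Int) 0))))).map
          natToInt := by
  unfold earlyElimination
  simp only [PySem.List.foldl_append_singleton_eq_map, List.nil_append]
  have hfun : (fun (idx_to_elim : List Int) (i : Int) =>
      if type = 1 ∧ (0:Int) ∈ fsc.map (fun c => PySem.List.pyGetD c i 0)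
               ∧ (2:Int) ∈ fsc.map (fun c => PySem.List.pyGetD c i 0) then idx_to_elim ++ [i]
      else if type = 0 ∧ (1:Int) ∈ fsc.map (fun c => PySem.List.pyGetD c i 0)
               ∧ (2:Int) ∈ fsc.map (fun c => PySem.List.pyGetD c i 0) then idx_to_elim ++ [i]
      else idx_to_elim)
      = (fun idx_to_elim i =>
          if (type = 1 ∧ (0:Int) ∈ fsc.map (fun c => PySem.List.pyGetD c i 0)
                   ∧ (2:Int) ∈ fsc.map (fun c => PySem.List.pyGetD c i 0)) ∨
             (type = 0 ∧ (1:Int) ∈ fsc.map (fun c => PySem.List.pyGetD c i 0)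
                   ∧ (2:Int) ∈ fsc.map (fun c => PySem.List.pyGetD c i 0))
          then idx_to_elim ++ [i] else idx_to_elim) := by
    funext acc i
    split_ifs <;> tauto
  rw [hfun, PySem.List.foldl_append_ite_eq_filter, List.nil_append,
      PySem.List.pyRange_zero_natCast, List.filter_map]
  simp [Function.comp_def, natToInt_eq, List.getD_eq_getElem?_getD]

-- B as a filter over the column indices (for known type, with the flags resolved)
theorem B_eq (fsc : List (List Int)) (t1 t2 : Int) :
    (let n := (fsc.headD []).length
     let flags := fsc.foldl (eeRowPass t1 t2 n)
       (List.replicate n false, List.replicate n false)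
     (List.range n).foldl
       (fun acc j =>
         if flags.1.getD j false && flags.2.getD j false then acc ++ [(j : Int)]
         else acc) [])
      = ((List.range (fsc.headD []).length).filter
          (fun (j : Nat) => fsc.any (fun row => decide (row.getD j 0 = t1))
                 && fsc.any (fun row => decide (row.getD j 0 = t2)))).map
          natToInt := by
  simp only [flags_eq]
  rw [PySem.List.foldl_append_if, List.nil_append, natToInt_eq]
  refine congrArg _ ?_
  apply List.filter_congr
  intro j hj
  have hjn : j < (fsc.headD []).length := List.mem_range.mp hj
  rw [flagFold_getD _ _ _ _ (List.length_replicate) j hjn,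
      flagFold_getD _ _ _ _ (List.length_replicate) j hjn]
  simp

-- ===== VERDICT (by name: the statement is the Claim_ definition above) =====
theorem earlyElimination_spec : Claim_equal_earlyElimination := by
  intro fsc type hDom hPre
  unfold Spec_earlyElimination
  rw [A_eq]
  by_cases h1 : type = 1
  · subst h1
    show _ = (let n := (fsc.headD []).length
      let flags := fsc.foldl (eeRowPass 0 2 n) (List.replicate n false, List.replicate n false)
      (List.range n).foldl
        (fun acc j => if flags.1.getD j false && flags.2.getD j false then acc ++ [(j : Int)]
          else acc) [])
    rw [B_eq]
    refine congrArg _ ?_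
    apply List.filter_congr
    intro j hj
    simp [List.mem_map, PySem.List.pyGetD_natCast]
    rw [Bool.eq_iff_iff]
    simp [List.any_eq_true]
  · by_cases h0 : type = 0
    · subst h0
      show _ = (let n := (fsc.headD []).length
        let flags := fsc.foldl (eeRowPass 1 2 n) (List.replicate n false, List.replicate n false)
        (List.range n).foldl
          (fun acc j => if flags.1.getD j false && flags.2.getD j false then acc ++ [(j : Int)]
            else acc) [])
      rw [B_eq]
      refine congrArg _ ?_
      apply List.filter_congr
      intro j hj
      simp [List.mem_map, PySem.List.pyGetD_natCast]
      rw [Bool.eq_iff_iff]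
      simp [List.any_eq_true]
    · have : earlyElimination_alt fsc type = [] := by
        simp [earlyElimination_alt, h0, h1]
      rw [this]
      simp [List.filter_eq_nil_iff.mpr, h0, h1]
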